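-- pv_equiv track=rewrite | github.com/akathorn/codejam | archive/2022/Round 1C/tower.py | solve_bruteforce
-- ===== SOURCE A (Python) =====
-- from typing import (
--     Any,
--     Callable,
--     Dict,
--     List,
--     Sequence,
--     Set,
--     TypeVar,
--     Union,
--     Tuple,
--     Optional,
-- )
--
-- def is_megatower(tower) -> bool:
--     seen = []
--     i = 0
--     while i < len(tower):
--         letter = tower[i]
--         if letter in seen:
--             return False
--         seen.append(letter)
--         while i < len(tower) and tower[i] == letter:
--             i += 1
--     return True
--
-- def choices(towers: List[str]):
--     for i in range(len(towers)):
--         yield towers[i], towers[:i] + towers[i + 1 :]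
--
-- def solve_bruteforce(towers: List[str]) -> Optional[str]:
--     if not all(is_megatower(t) for t in towers):
--         return None
--     states: List[Tuple[str, List[str]]] = [("", towers)]
--     while states:
--         mega, remaining = states.pop()
--         if not remaining:
--             return mega
--
--         for tower, rest in choices(remaining):
--             new = mega + tower
--             if is_megatower(new):
--                 states.append((new, rest))
--
--     return None
-- ===== SOURCE B (Python) =====
-- def is_megatower(tower) -> bool:
--     seen = []
--     i = 0
--     while i < len(tower):
--         letter = tower[i]
--         if letter in seen:
--             return False
--         seen.append(letter)
--         while i < len(tower) and tower[i] == letter: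
--             i += 1
--     return True
--
--
-- def _dfs(mega, remaining):
--     if not remaining:
--         return mega
--     for i in reversed(range(len(remaining))):
--         new = mega + remaining[i]
--         if is_megatower(new):
--             res = _dfs(new, remaining[:i] + remaining[i + 1:])
--             if res is not None:
--                 return res
--     return None
--
--
-- def solve_bruteforce(towers):
--     if not all(is_megatower(t) for t in towers):
--         return None
--     return _dfs("", towers)
-- ===== Notes on version B (the rewrite author's own statement) =====
-- stated objective: simpler
-- what changed: Replaces the explicit worklist stack of (mega, remaining) states with a recursive depth-first search helper that tries candidates in reversed index order and returns the first non-None result.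
import Mathlib
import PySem

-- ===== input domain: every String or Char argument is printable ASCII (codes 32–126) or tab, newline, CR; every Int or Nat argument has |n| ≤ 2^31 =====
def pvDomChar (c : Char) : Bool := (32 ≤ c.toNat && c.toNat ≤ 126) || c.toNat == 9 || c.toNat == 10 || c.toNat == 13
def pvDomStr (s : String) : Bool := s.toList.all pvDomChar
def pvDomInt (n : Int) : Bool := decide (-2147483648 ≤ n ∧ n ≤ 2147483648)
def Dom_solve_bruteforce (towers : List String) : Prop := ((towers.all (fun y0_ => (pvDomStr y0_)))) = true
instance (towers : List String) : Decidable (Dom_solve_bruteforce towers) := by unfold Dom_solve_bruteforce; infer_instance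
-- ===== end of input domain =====

-- B replaces A's explicit worklist stack by a recursive depth-first search (simpler decomposition, same result).

-- ===== PORT A =====
-- shared helper: the inner `while i < len(tower) and tower[i] == letter: i += 1` loop
def isMegaSkip (tower : List Char) (letter : Char) (i : Nat) : Nat :=
  if h : i < tower.length then
    if tower[i] = letter then isMegaSkip tower letter (i + 1) else i
  else i
termination_by tower.length - i

theorem isMegaSkip_ge (tower : List Char) (letter : Char) (i : Nat) :
    i ≤ isMegaSkip tower letter i := by
  fun_induction isMegaSkip tower letter i <;> omega

-- the outer while loop of is_megatower, with state (seen, i)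
def isMegaLoop (tower : List Char) (seen : List Char) (i : Nat) : Bool :=
  if h : i < tower.length then
    if tower[i] ∈ seen then false
    else isMegaLoop tower (seen ++ [tower[i]]) (isMegaSkip tower tower[i] i)
  else true
termination_by tower.length - i
decreasing_by
  have h1 : i + 1 ≤ isMegaSkip tower tower[i] i := by
    unfold isMegaSkip
    simp only [h, dif_pos]
    exact isMegaSkip_ge tower tower[i] (i + 1)
  omega

def is_megatower (tower : String) : Bool := isMegaLoop tower.toList [] 0

-- choices(towers): indexing and slicing are exact here since i < len(towers)
def choices (towers : List String) : List (String × List String) :=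
  (List.range towers.length).map
    (fun i => (towers.getD i "", towers.take i ++ towers.drop (i + 1)))

-- termination measure for the worklist loop: Σ (|remaining| + 1)!
def megaMeasure (states : List (String × List String)) : Nat :=
  (states.map (fun p => (p.2.length + 1).factorial)).sum

-- the for-loop pushing accepted children onto the stack = reversed filterMap consed on
theorem foldl_push (mega : String) (L : List (String × List String))
    (acc : List (String × List String)) :
    L.foldl (fun st p => if is_megatower (mega ++ p.1) then (mega ++ p.1, p.2) :: st else st) acc
      = (L.filterMap
          (fun p => if is_megatower (mega ++ p.1) then some (mega ++ p.1, p.2) else none)).reverse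
        ++ acc := by
  induction L generalizing acc with
  | nil => rfl
  | cons x L ih =>
    simp only [List.foldl_cons, List.filterMap_cons]
    split <;> simp [ih]

theorem megaMeasure_children (mega : String) (remaining : List String) :
    megaMeasure ((choices remaining).filterMap
      (fun p => if is_megatower (mega ++ p.1) then some (mega ++ p.1, p.2) else none)).reverse
      < (remaining.length + 1).factorial := by
  have hlen : ∀ p ∈ (choices remaining).filterMap
      (fun p => if is_megatower (mega ++ p.1) then some (mega ++ p.1, p.2) else none),
      (p.2.length + 1).factorial ≤ remaining.length.factorial := by
    intro p hp
    rcases List.mem_filterMap.mp hp with ⟨q, hq, hfq⟩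
    have hq2 : q.2.length + 1 = remaining.length := by
      rcases List.mem_map.mp hq with ⟨i, hi, hgi⟩
      have hi' : i < remaining.length := List.mem_range.mp hi
      subst hgi; simp; omega
    have hp2 : p.2 = q.2 := by
      by_cases hc : is_megatower (mega ++ q.1) = true
      · simp [hc] at hfq
        simp [← hfq]
      · simp [hc] at hfq
    rw [hp2, hq2]
  have hcard : ((choices remaining).filterMap
      (fun p => if is_megatower (mega ++ p.1) then some (mega ++ p.1, p.2) else none)).length ≤ remaining.length := by
    calc _ ≤ (choices remaining).length := List.length_filterMap_le _ _
    _ = remaining.length := by simp [choices]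
  have hlen' : ∀ x ∈ ((choices remaining).filterMap
      (fun p => if is_megatower (mega ++ p.1) then some (mega ++ p.1, p.2) else none)).map
        (fun p => (p.2.length + 1).factorial), x ≤ remaining.length.factorial := by
    intro x hx
    rcases List.mem_map.mp hx with ⟨p, hp, rfl⟩
    exact hlen p hp
  have hsum := List.sum_le_card_nsmul _ _ hlen'
  simp only [megaMeasure, List.map_reverse, List.sum_reverse, List.length_map, smul_eq_mul] at hsum ⊢
  calc _ ≤ _ := hsum
  _ ≤ remaining.length * remaining.length.factorial := Nat.mul_le_mul_right _ hcard
  _ < (remaining.length + 1).factorial := by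
      rw [Nat.factorial_succ]
      exact (Nat.mul_lt_mul_right remaining.length.factorial_pos).mpr (Nat.lt_succ_self remaining.length)

-- the `while states:` loop; the stack is kept head-as-top (states.pop() = head, append = cons)
def megaLoop (states : List (String × List String)) : Option String :=
  match states with
  | [] => none
  | (mega, remaining) :: rest =>
    if remaining.isEmpty then some mega
    else
      megaLoop ((choices remaining).foldl
        (fun st p => if is_megatower (mega ++ p.1) then (mega ++ p.1, p.2) :: st else st) rest)
termination_by megaMeasure states
decreasing_by
  simp only [dite_eq_ite]
  rw [foldl_push]
  have h := megaMeasure_children mega remaining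
  simp only [megaMeasure, List.map_append, List.sum_append, List.map_cons, List.sum_cons] at *
  omega

def solve_bruteforce (towers : List String) : Option String :=
  if towers.all (fun t => is_megatower t) then megaLoop [("", towers)] else none

-- ===== PORT B =====
-- recursive DFS: try candidates i in reversed(range(len(remaining))), return first non-None result
def dfs (mega : String) (remaining : List String) : Option String :=
  if remaining.isEmpty then some mega
  else
    (List.range remaining.length).reverse.attach.findSome? (fun s =>
      if is_megatower (mega ++ remaining.getD s.1 "") then
        dfs (mega ++ remaining.getD s.1 "") (remaining.take s.1 ++ remaining.drop (s.1 + 1))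
      else none)
termination_by remaining.length
decreasing_by
  have : s.1 < remaining.length := List.mem_range.mp (List.mem_reverse.mp s.2)
  simp; omega

def solve_bruteforce_alt (towers : List String) : Option String :=
  if towers.all (fun t => is_megatower t) then dfs "" towers else none

-- ===== PRECONDITION & SPEC =====
def Spec_solve_bruteforce (towers : List String) (out : Option String) : Prop := out = solve_bruteforce_alt towers
instance (towers : List String) (out : Option String) : Decidable (Spec_solve_bruteforce towers out) := by unfold Spec_solve_bruteforce; infer_instance

-- ===== CLAIM (what is proved, stated in full; the proofs are below) =====
def Claim_equal_solve_bruteforce : Prop := ∀ (towers : List String), Dom_solve_bruteforce towers → Spec_solve_bruteforce towers (solve_bruteforce towers)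

-- ===== LEMMAS AND PROOFS =====
theorem findSome?_filterMap {α β γ : Type} (l : List α) (f : α → Option β) (d : β → Option γ) :
    (l.filterMap f).findSome? d = l.findSome? (fun x => (f x).bind d) := by
  induction l with
  | nil => rfl
  | cons x l ih =>
    simp only [List.filterMap_cons]
    cases hfx : f x with
    | none => simp [hfx, ih]
    | some b =>
      simp only [List.findSome?_cons, hfx, Option.bind_some]
      cases d b <;> simp [ih]

theorem findSome?_attach {α β : Type} (l : List α) (G : {x // x ∈ l} → Option β)
    (F : α → Option β) (hGF : ∀ s, G s = F s.1) :
    l.attach.findSome? G = l.findSome? F := by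
  rw [funext hGF]
  conv_rhs => rw [← List.attach_map_subtype_val l]
  rw [List.findSome?_map]
  rfl

-- the core correspondence: the stack loop computes the first DFS success over the stack
theorem megaLoop_eq_findSome (S : List (String × List String)) :
    megaLoop S = S.findSome? (fun p => dfs p.1 p.2) := by
  generalize hn : megaMeasure S = n
  induction n using Nat.strong_induction_on generalizing S with
  | _ n ih =>
  subst hn
  match S with
  | [] => rw [megaLoop]; rfl
  | (mega, remaining) :: rest =>
  rw [megaLoop]
  by_cases hemp : remaining.isEmpty = true
  · rw [List.findSome?_cons]
    have : dfs mega remaining = some mega := by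
      rw [dfs.eq_def]; simp [hemp]
    simp [hemp, this]
  · rw [if_neg hemp]
    have hdec : megaMeasure ((choices remaining).foldl
        (fun st p => if is_megatower (mega ++ p.1) then (mega ++ p.1, p.2) :: st else st) rest)
        < megaMeasure ((mega, remaining) :: rest) := by
      rw [foldl_push]
      have h := megaMeasure_children mega remaining
      simp only [megaMeasure, List.map_append, List.sum_append, List.map_cons, List.sum_cons] at *
      omega
    rw [ih _ hdec _ rfl, foldl_push, List.findSome?_append, List.findSome?_cons]
    have hch : ((choices remaining).filterMap
        (fun p => if is_megatower (mega ++ p.1) then some (mega ++ p.1, p.2) else none)).reverse.findSome?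
          (fun p => dfs p.1 p.2) = dfs mega remaining := by
      rw [← List.filterMap_reverse, findSome?_filterMap, choices, ← List.map_reverse,
        List.findSome?_map]
      rw [dfs.eq_def, if_neg hemp, findSome?_attach _ _
        (fun i => if is_megatower (mega ++ remaining.getD i "") then
          dfs (mega ++ remaining.getD i "") (remaining.take i ++ remaining.drop (i + 1)) else none)
        (fun s => rfl)]
      congr 1
      funext i
      simp only [Function.comp]
      split <;> simp
    rw [hch]
    cases dfs mega remaining <;> simp

-- ===== VERDICT (by name: the statement is the Claim_ definition above) =====
theorem solve_bruteforce_spec : Claim_equal_solve_bruteforce := by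
  intro towers _
  unfold Spec_solve_bruteforce solve_bruteforce solve_bruteforce_alt
  rw [megaLoop_eq_findSome]
  cases h : dfs "" towers <;> simp [h]
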